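-- pv_equiv track=rewrite | github.com/Gowdk/bookbot | main.py | finalized_report
-- ===== SOURCE A (Python) =====
-- def count_each_char(contents):
--     alphabet = {}
--     character = ""
--     #split contents into words
--     words = contents.split()
--     for word in words:
--         # look at each word individually
--         for i in range(len(word)):
--             character = word[i].lower()
--             # Make sure we're dealing with letters
--             if character.isalpha():
--                 # look at each character individually
--                 if character not in alphabet.keys():
--                     alphabet[character] = 1
--                 else:
--                     alphabet[character] += 1
--     return alphabet
--
-- def finalized_report(contents):
--     ordered = {}
--
--     # Beginning of report
--     report_string = "--- Begin report of books/frankenstein.txt ---\n"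
--
--     # General information regarding total words in document
--     report_string += f"{count_words(contents)} words found in the document\n\n"
--
--     # Begin printing information regarding character count, but should be ordered most -> least
--     # Unordered dictionary:
--     count_of_characters = count_each_char(contents)
--
--     ordered = ordered_dictionary(count_of_characters)
--
--     for key in ordered:
--         report_string += f"The '{key}' character was found {ordered[key]} times \n"
--     report_string += "--- End report ---"
--
--
--     return report_string
--
-- def ordered_dictionary(dict):
--     copy_dict = dict.copy()
--     return_dict = {}
--
--     #Set to the character
--     max_key_so_far = ''
--
--     # While we have values in copy_dict:
--     while len(copy_dict) > 0:
--         #reset max_so_far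
--         max_so_far = float("-inf")
--
--         # Run through the characters in copy_dict:
--         for key in copy_dict:
--           # if a characters count is greater than
--             if copy_dict[key] > max_so_far:
--                 # Set max_so_far
--                 max_so_far = copy_dict[key]
--                 # Set the greatest value character
--                 max_key_so_far = key
--
--         # Values should be set, so remove them from copy_dict and add them to new_dict
--         return_dict[max_key_so_far] = max_so_far
--         del copy_dict[max_key_so_far]
--     return return_dict
--
-- def count_words(contents):
--     counter = 0
--     words = contents.split()
--     for word in words:
--         counter += 1
--     return counter
-- ===== SOURCE B (Python) =====
-- def count_each_char(contents):
--     alphabet = {}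
--     character = ""
--     #split contents into words
--     words = contents.split()
--     for word in words:
--         # look at each word individually
--         for i in range(len(word)):
--             character = word[i].lower()
--             # Make sure we're dealing with letters
--             if character.isalpha():
--                 # look at each character individually
--                 if character not in alphabet.keys():
--                     alphabet[character] = 1
--                 else:
--                     alphabet[character] += 1
--     return alphabet
--
-- def finalized_report(contents):
--     words = contents.split()
--     counts = count_each_char(contents)
--     # stable sort on the negated count keeps first-seen order among ties,
--     # exactly the strict-> selection loop's tie-break
--     pairs = sorted(counts.items(), key=lambda kv: -kv[1])
--     report = "--- Begin report of books/frankenstein.txt ---\n"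
--     report += f"{len(words)} words found in the document\n\n"
--     for ch, n in pairs:
--         report += f"The '{ch}' character was found {n} times \n"
--     report += "--- End report ---"
--     return report
-- ===== Notes on version B (the rewrite author's own statement) =====
-- stated objective: simpler
-- what changed: ordered_dictionary's O(k^2) selection-sort while-loop (repeated first-strict-max scan + delete) is replaced by one stable sorted() call keyed on the negated count, whose stability reproduces the first-seen tie-break; count_words' counting loop becomes len().
import Mathlib
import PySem

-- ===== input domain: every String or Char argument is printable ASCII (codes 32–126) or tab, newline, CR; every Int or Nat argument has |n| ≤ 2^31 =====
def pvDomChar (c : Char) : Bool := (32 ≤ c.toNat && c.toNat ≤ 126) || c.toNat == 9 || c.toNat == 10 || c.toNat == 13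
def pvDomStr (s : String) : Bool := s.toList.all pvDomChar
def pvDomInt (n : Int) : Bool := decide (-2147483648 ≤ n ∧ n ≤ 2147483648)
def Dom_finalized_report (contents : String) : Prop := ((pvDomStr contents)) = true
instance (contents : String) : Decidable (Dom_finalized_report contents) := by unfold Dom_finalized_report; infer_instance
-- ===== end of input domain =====

-- B replaces A's selection-sort ordering loop by one stable sort on the negated count
-- (objective: simpler); everything else (the counting helper, the report text) is unchanged.

-- ===== PORT A =====

-- count_each_char (helper shared verbatim by A and B)
def countEachChar (contents : String) : PySem.Dict Char Int :=
  (PySem.Str.split₀ contents).foldl (fun d w =>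
    (PySem.List.pyRange 0 (PySem.Str.len w) 1).foldl (fun d i =>
      -- word[i]: i comes from range(len(word)), always in range, so pyGetD is exact here
      let character := PySem.Chars.lowerChar (PySem.List.pyGetD w.toList i ' ')
      if PySem.Chars.isalpha character then
        -- 'alphabet[character] = 1' / 'alphabet[character] += 1' (lookup always succeeds in the else branch)
        if d.contains character then d.insert character (d.getD character 0 + 1)
        else d.insert character 1
      else d) d) PySem.Dict.empty

-- count_words
def countWords (contents : String) : Int :=
  (PySem.Str.split₀ contents).foldl (fun c _ => c + 1) 0

-- inner 'for key in copy_dict' scan of ordered_dictionary (copy_dict[key] always succeeds: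
-- key ∈ copy_dict); max_so_far = none models the float("-inf") start (any int is > it),
-- mk0 is the max_key_so_far carried over from the previous while-iteration
def findMax (copy : PySem.Dict Char Int) (mk0 : Char) : Option Int × Char :=
  copy.keys.foldl (fun st k =>
    match st with
    | (none, _) => (some (copy.getD k 0), k)
    | (some m, mkk) => if m < copy.getD k 0 then (some (copy.getD k 0), k) else (some m, mkk))
    (none, mk0)

-- the 'while len(copy_dict) > 0' loop; fuel = copy.size at the call makes it exact
-- (each iteration deletes one present key, so the size drops by exactly one)
def ordLoop : Nat → PySem.Dict Char Int → PySem.Dict Char Int → Char → PySem.Dict Char Int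
  | 0, _, ret, _ => ret
  | fuel+1, copy, ret, mk0 =>
    if 0 < copy.size then
      let r := findMax copy mk0
      ordLoop fuel (copy.erase r.2) (ret.insert r.2 (r.1.getD 0)) r.2
    else ret

-- ordered_dictionary; the initial max_key_so_far = '' is a never-read placeholder (the dict is
-- nonempty on every inner scan, which always overwrites it), modelled by ' '
def orderedDictionary (d : PySem.Dict Char Int) : PySem.Dict Char Int :=
  ordLoop d.size d PySem.Dict.empty ' '

def finalized_report (contents : String) : String :=
  let report0 := "--- Begin report of books/frankenstein.txt ---\n"
  let report1 := report0 ++ PySem.Int.toStr (countWords contents) ++ " words found in the document\n\n"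
  let count_of_characters := countEachChar contents
  let ordered := orderedDictionary count_of_characters
  -- 'for key in ordered: … ordered[key] …' (lookup always succeeds: key ∈ ordered)
  let report2 := (PySem.Dict.keys ordered).foldl (fun acc k =>
      acc ++ "The '" ++ String.mk [k] ++ "' character was found "
          ++ PySem.Int.toStr (ordered.getD k 0) ++ " times \n") report1
  report2 ++ "--- End report ---"

-- ===== PORT B =====

def finalized_report_alt (contents : String) : String :=
  let words := PySem.Str.split₀ contents
  let counts := countEachChar contents
  -- stable sort on the negated count: ties keep first-seen (insertion) order
  let pairs := PySem.List.sorted counts.items (fun kv => -kv.2)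
  let report1 := "--- Begin report of books/frankenstein.txt ---\n"
      ++ PySem.Int.toStr (words.length : Int) ++ " words found in the document\n\n"
  (pairs.foldl (fun acc kv =>
      acc ++ "The '" ++ String.mk [kv.1] ++ "' character was found "
          ++ PySem.Int.toStr kv.2 ++ " times \n") report1)
    ++ "--- End report ---"

-- ===== PRECONDITION & SPEC =====
def Spec_finalized_report (contents : String) (out : String) : Prop := out = finalized_report_alt contents
instance (contents : String) (out : String) : Decidable (Spec_finalized_report contents out) := by unfold Spec_finalized_report; infer_instance

-- ===== CLAIM (what is proved, stated in full; the proofs are below) =====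
def Claim_equal_finalized_report : Prop := ∀ (contents : String), Dom_finalized_report contents → Spec_finalized_report contents (finalized_report contents)

-- ===== LEMMAS AND PROOFS =====

-- the sort key used throughout the proofs
def pvKey (kv : Char × Int) : Int := -kv.2

-- one step of A's inner max scan, at the level of the items list
def pvScanStep (st : Option Int × Char) (kv : Char × Int) : Option Int × Char :=
  match st with
  | (none, _) => (some kv.2, kv.1)
  | (some m, mkk) => if m < kv.2 then (some kv.2, kv.1) else (some m, mkk)

-- the word-count loop is the length of the word list
lemma pv_countWords_eq (contents : String) :
    countWords contents = ((PySem.Str.split₀ contents).length : Int) := by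
  unfold countWords
  have := PySem.List.foldl_add (l := PySem.Str.split₀ contents) (g := fun _ => (1:Int)) (a := 0)
  simpa [PySem.List.sum_map_const_int] using this

-- inserting an element before everything strictly greater puts it in front
lemma pv_insertBy_min {m : Char × Int} (acc : List (Char × Int))
    (h : ∀ y ∈ acc, pvKey m < pvKey y) :
    PySem.List.insertBy (fun a b => decide (pvKey a < pvKey b)) m acc = m :: acc := by
  cases acc with
  | nil => rfl
  | cons y t => simp [PySem.List.insertBy, h y (by simp)]

-- inserting a ≥-key element never displaces the minimal head
lemma pv_insertBy_cons {m z : Char × Int} (acc : List (Char × Int))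
    (h : pvKey m ≤ pvKey z) :
    PySem.List.insertBy (fun a b => decide (pvKey a < pvKey b)) z (m :: acc)
      = m :: PySem.List.insertBy (fun a b => decide (pvKey a < pvKey b)) z acc := by
  simp [PySem.List.insertBy, not_lt.mpr h]

lemma pv_foldl_ins_cons (suf : List (Char × Int)) (m : Char × Int) :
    ∀ (Q : List (Char × Int)), (∀ y ∈ suf, pvKey m ≤ pvKey y) →
    suf.foldl (fun acc x => PySem.List.insertBy (fun a b => decide (pvKey a < pvKey b)) x acc) (m :: Q)
      = m :: suf.foldl (fun acc x => PySem.List.insertBy (fun a b => decide (pvKey a < pvKey b)) x acc) Q := by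
  induction suf with
  | nil => intro Q _; rfl
  | cons z t ih =>
      intro Q h
      simp only [List.foldl_cons]
      rw [pv_insertBy_cons Q (h z (by simp))]
      exact ih _ (fun y hy => h y (by simp [hy]))

-- stability of PySem's sort: the first minimal-key element comes out first
lemma pv_sorted_extract (pre suf : List (Char × Int)) (m : Char × Int)
    (h1 : ∀ y ∈ pre, pvKey m < pvKey y) (h2 : ∀ y ∈ suf, pvKey m ≤ pvKey y) :
    PySem.List.sorted (pre ++ m :: suf) pvKey
      = m :: PySem.List.sorted (pre ++ suf) pvKey := by
  rw [PySem.List.sorted_eq_foldl_insertBy, PySem.List.sorted_eq_foldl_insertBy]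
  simp only [List.foldl_append, List.foldl_cons]
  have hP : ∀ y ∈ pre.foldl (fun acc x => PySem.List.insertBy (fun a b => decide (pvKey a < pvKey b)) x acc) [],
      pvKey m < pvKey y := by
    intro y hy
    rw [← PySem.List.sorted_eq_foldl_insertBy] at hy
    exact h1 y ((PySem.List.mem_sorted _ _ _ _).1 hy)
  rw [pv_insertBy_min _ hP]
  exact pv_foldl_ins_cons suf m _ h2

-- A's strict '>' scan returns the FIRST maximal element
lemma pv_scan_spec (l : List (Char × Int)) (hne : l ≠ []) (c0 : Char) :
    ∃ pre mk mv suf, l = pre ++ (mk, mv) :: suf ∧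
      (∀ y ∈ pre, y.2 < mv) ∧ (∀ y ∈ suf, y.2 ≤ mv) ∧
      l.foldl pvScanStep (none, c0) = (some mv, mk) := by
  induction l using List.reverseRecOn with
  | nil => exact absurd rfl hne
  | append_singleton t x ih =>
      cases t with
      | nil =>
          exact ⟨[], x.1, x.2, [], by simp, by simp, by simp, by simp [pvScanStep]⟩
      | cons a t' =>
          obtain ⟨pre, mk, mv, suf, heq, hpre, hsuf, hscan⟩ := ih (by simp)
          rw [List.foldl_append, hscan]
          by_cases hlt : mv < x.2
          · refine ⟨a :: t', x.1, x.2, [], by simp, ?_, by simp, by simp [pvScanStep, hlt]⟩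
            intro y hy
            rw [heq] at hy
            rcases List.mem_append.1 hy with h | h
            · exact lt_trans (hpre y h) hlt
            · rcases List.mem_cons.1 h with h | h
              · subst h; exact hlt
              · exact lt_of_le_of_lt (hsuf y h) hlt
          · refine ⟨pre, mk, mv, suf ++ [x], by simp [heq], hpre, ?_, by simp [pvScanStep, hlt]⟩
            intro y hy
            rcases List.mem_append.1 hy with h | h
            · exact hsuf y h
            · simp at h; subst h; omega

-- findMax is the items-level scan (keys are looked up in the same dict)
lemma pv_findMax_eq_scan (copy : PySem.Dict Char Int) (hnd : copy.keys.Nodup) (mk0 : Char) :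
    findMax copy mk0 = copy.items.foldl pvScanStep (none, mk0) := by
  unfold findMax
  rw [show copy.keys = copy.items.map (·.1) from rfl, List.foldl_map]
  apply PySem.List.foldl_congr_mem
  intro acc kv hkv
  have hg : copy.getD kv.1 0 = kv.2 :=
    PySem.Dict.getD_of_mem_items copy (by simpa using hkv) hnd 0
  obtain ⟨o, c⟩ := acc
  cases o with
  | none => simp [pvScanStep, hg]
  | some m => simp [pvScanStep, hg]

-- deleting the found key removes exactly that item
lemma pv_erase_items (copy : PySem.Dict Char Int) (pre suf : List (Char × Int))
    (mk : Char) (mv : Int) (hit : copy.items = pre ++ (mk, mv) :: suf)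
    (hnd : copy.keys.Nodup) :
    (copy.erase mk).items = pre ++ suf := by
  have hnd' : ((pre ++ (mk, mv) :: suf).map (·.1)).Nodup := by
    rw [show copy.keys = copy.items.map (·.1) from rfl, hit] at hnd
    exact hnd
  simp only [List.map_append, List.map_cons, List.nodup_append, List.nodup_cons] at hnd'
  have hp : ∀ p ∈ pre, (!p.1 == mk) = true := by
    intro p hp
    have : p.1 ≠ mk := hnd'.2.2 p.1 (List.mem_map_of_mem hp) mk (by simp)
    simp [this]
  have hs : ∀ p ∈ suf, (!p.1 == mk) = true := by
    intro p hp
    have : p.1 ≠ mk := by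
      intro h; exact hnd'.2.1.1 (h ▸ (List.mem_map_of_mem hp : p.1 ∈ _))
    simp [this]
  show (copy.items.filter _) = _
  rw [hit, List.filter_append, List.filter_cons]
  simp only [beq_self_eq_true, Bool.not_true, Bool.false_eq_true, if_false]
  rw [List.filter_eq_self.mpr hp, List.filter_eq_self.mpr hs]

-- the selection loop produces exactly the stable sort by descending count
lemma pv_ordLoop_items (fuel : Nat) :
    ∀ (copy ret : PySem.Dict Char Int) (mk0 : Char),
      copy.keys.Nodup → ret.keys.Nodup →
      (∀ k ∈ copy.keys, k ∉ ret.keys) → copy.size ≤ fuel →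
      (ordLoop fuel copy ret mk0).items = ret.items ++ PySem.List.sorted copy.items pvKey := by
  induction fuel with
  | zero =>
      intro copy ret mk0 _ _ _ hsz
      have h0 : copy.items = [] := List.length_eq_zero_iff.mp (Nat.le_zero.mp hsz)
      simp [ordLoop, h0]
      rfl
  | succ fuel ih =>
      intro copy ret mk0 hcn hrn hdisj hsz
      by_cases hpos : 0 < copy.size
      · have hne : copy.items ≠ [] := by
          intro h; rw [show copy.size = copy.items.length from rfl, h] at hpos; simp at hpos
        obtain ⟨pre, mk, mv, suf, heq, hpre, hsuf, hscan⟩ := pv_scan_spec copy.items hne mk0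
        have hfm : findMax copy mk0 = (some mv, mk) := by
          rw [pv_findMax_eq_scan copy hcn mk0, hscan]
        have hkeys : copy.keys = copy.items.map (·.1) := rfl
        have hmem_mk : mk ∈ copy.keys := by rw [hkeys, heq]; simp
        have hcontains : ret.contains mk = false := by
          have hn := hdisj mk hmem_mk
          cases hc : ret.contains mk with
          | false => rfl
          | true => exact absurd ((PySem.Dict.contains_iff_mem_keys ret mk).1 hc) hn
        have herase := pv_erase_items copy pre suf mk mv heq hcn
        have hsub : ((pre ++ suf).map (·.1)).Sublist ((pre ++ (mk, mv) :: suf).map (·.1)) := by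
          simp only [List.map_append, List.map_cons]
          exact List.Sublist.append (List.Sublist.refl _) (List.sublist_cons_self _ _)
        have hcn' : (copy.erase mk).keys.Nodup := by
          have : (copy.erase mk).keys = (pre ++ suf).map (·.1) := by
            rw [show (copy.erase mk).keys = (copy.erase mk).items.map (·.1) from rfl, herase]
          rw [this]
          exact List.Nodup.sublist hsub (by rw [hkeys, heq] at hcn; exact hcn)
        have hrn' : (ret.insert mk mv).keys.Nodup := PySem.Dict.nodup_keys_insert ret mk mv hrn
        have hdisj' : ∀ k ∈ (copy.erase mk).keys, k ∉ (ret.insert mk mv).keys := by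
          intro k hk
          have hk' : k ∈ (pre ++ suf).map (·.1) := by
            rw [show (copy.erase mk).keys = (copy.erase mk).items.map (·.1) from rfl, herase] at hk
            exact hk
          have hkold : k ∈ copy.keys := by
            rw [hkeys, heq]
            rcases List.mem_map.1 hk' with ⟨p, hp, hpe⟩
            exact List.mem_map.2 ⟨p, by rcases List.mem_append.1 hp with h | h <;> simp [h], hpe⟩
          have hkne : k ≠ mk := by
            have hnd := hcn
            rw [hkeys, heq] at hnd
            simp only [List.map_append, List.map_cons, List.nodup_append, List.nodup_cons] at hnd
            intro h; subst h
            rw [List.map_append] at hk'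
            rcases List.mem_append.1 hk' with h | h
            · exact hnd.2.2 k h k (by simp) rfl
            · exact hnd.2.1.1 h
          rw [PySem.Dict.keys_insert_of_not_contains ret mv hcontains]
          simp only [List.mem_append, List.mem_singleton]
          rintro (h | h)
          · exact hdisj k hkold h
          · exact hkne h
        have hsz' : (copy.erase mk).size ≤ fuel := by
          have h1 : (copy.erase mk).size = (pre ++ suf).length := by
            rw [show (copy.erase mk).size = (copy.erase mk).items.length from rfl, herase]
          have h2 : copy.size = (pre ++ (mk, mv) :: suf).length := by
            rw [show copy.size = copy.items.length from rfl, heq]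
          simp only [List.length_append, List.length_cons] at h1 h2
          omega
        show (ordLoop (fuel+1) copy ret mk0).items = _
        unfold ordLoop
        rw [if_pos hpos]
        simp only [hfm, Option.getD_some]
        rw [ih _ _ _ hcn' hrn' hdisj' hsz',
            PySem.Dict.items_insert_of_not_contains ret _ hcontains, herase, heq,
            pv_sorted_extract pre suf (mk, mv)
              (fun y hy => by simp only [pvKey]; have := hpre y hy; omega)
              (fun y hy => by simp only [pvKey]; have := hsuf y hy; omega)]
        simp [List.append_assoc]
      · have h0 : copy.items = [] := by
          rw [show copy.size = copy.items.length from rfl] at hpos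
          exact List.length_eq_zero_iff.mp (by omega)
        unfold ordLoop
        rw [if_neg hpos]
        simp [h0]
        rfl

lemma pv_orderedDictionary_items (d : PySem.Dict Char Int) (hnd : d.keys.Nodup) :
    (orderedDictionary d).items = PySem.List.sorted d.items pvKey := by
  have := pv_ordLoop_items d.size d PySem.Dict.empty ' ' hnd PySem.Dict.nodup_keys_empty
    (by simp [PySem.Dict.keys_empty]) (le_refl _)
  simpa [orderedDictionary] using this

lemma pv_orderedDictionary_nodup (d : PySem.Dict Char Int) (hnd : d.keys.Nodup) :
    (orderedDictionary d).keys.Nodup := by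
  have hk : (orderedDictionary d).keys = (PySem.List.sorted d.items pvKey).map (·.1) := by
    rw [show (orderedDictionary d).keys = (orderedDictionary d).items.map (·.1) from rfl,
        pv_orderedDictionary_items d hnd]
  rw [hk]
  exact ((PySem.List.sorted_perm d.items pvKey false).map (fun p : Char × Int => p.1)).nodup_iff.mpr
    (show (d.items.map (fun p : Char × Int => p.1)).Nodup from hnd)

lemma pv_foldl_nodup {β : Type} (l : List β) (f : PySem.Dict Char Int → β → PySem.Dict Char Int)
    (hf : ∀ d x, d.keys.Nodup → (f d x).keys.Nodup) :
    ∀ d, d.keys.Nodup → (l.foldl f d).keys.Nodup := by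
  induction l with
  | nil => intro d h; exact h
  | cons x t ih => intro d h; exact ih _ (hf d x h)

lemma pv_countEachChar_nodup (contents : String) : (countEachChar contents).keys.Nodup := by
  unfold countEachChar
  apply pv_foldl_nodup
  · intro d w hd
    apply pv_foldl_nodup
    · intro d i hdi
      dsimp only
      split_ifs with h1 h2
      · exact PySem.Dict.nodup_keys_insert _ _ _ hdi
      · exact PySem.Dict.nodup_keys_insert _ _ _ hdi
      · exact hdi
    · exact hd
  · exact PySem.Dict.nodup_keys_empty

-- ===== VERDICT (by name: the statement is the Claim_ definition above) =====
theorem finalized_report_spec : Claim_equal_finalized_report := by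
  intro contents _
  show finalized_report contents = finalized_report_alt contents
  have hnd := pv_countEachChar_nodup contents
  have hond := pv_orderedDictionary_nodup _ hnd
  have hitems := pv_orderedDictionary_items _ hnd
  dsimp only [finalized_report, finalized_report_alt]
  rw [pv_countWords_eq,
      show (fun kv : Char × Int => -kv.2) = pvKey from rfl,
      ← hitems,
      PySem.Dict.items_eq_map_keys _ hond 0,
      List.foldl_map]
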